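-- pv_equiv track=rewrite | github.com/edenferreira/advent-2016 | day-7-2.py | support_tls
-- ===== SOURCE A (Python) =====
-- from itertools import chain
--
-- def flatten(it):
--     return chain.from_iterable(it)
--
-- def uniq(ls):
--     return list(set(ls))
--
-- def split_word(word):
--     outside = []
--     inside = []
--     temp = ''
--     for w in word:
--         if w == '[':
--             outside.append(temp)
--             temp = ''
--         elif w == ']':
--             inside.append(temp)
--             temp = ''
--         else:
--             temp += w
--     outside.append(temp)
--     return (outside, inside)
--
-- def is_aba(word):
--     return word[0] == word[2] and word[0] != word[1]
--
-- def to_bab(word):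
--     assert is_aba(word)
--     return word[1] + word[0] + word[1]
--
-- def extract_abas(word):
--     abas = []
--     while len(word) > 2:
--         to_test = word[:3]
--         if is_aba(to_test):
--             abas.append(to_test)
--         word = word[1:]
--     return abas
--
-- def support_tls(word):
--     outside, inside = split_word(word)
--     outside_abas = uniq(flatten(extract_abas(w) for w in outside))
--     if not outside_abas:
--         return False
--     possible_babs = [to_bab(w) for w in outside_abas]
--     for bab in possible_babs:
--         for words in inside:
--             if bab in words:
--                 return True
--     return False
-- ===== SOURCE B (Python) =====
-- def support_tls(word):
--     # One streaming pass: keep the last two chars of the current segment,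
--     # collect ABA pairs of the segment in `cur`; on '[' the segment was outside,
--     # on ']' it was inside (store inside pairs swapped); answer = sets intersect.
--     out_pairs = set()
--     in_pairs = set()
--     cur = set()
--     p2 = p1 = None
--     for c in word:
--         if c == '[':
--             out_pairs.update(cur)
--             cur = set()
--             p2 = p1 = None
--         elif c == ']':
--             in_pairs.update((b, a) for (a, b) in cur)
--             cur = set()
--             p2 = p1 = None
--         else:
--             if p2 is not None and p2 == c and p2 != p1:
--                 cur.add((p2, p1))
--             p2, p1 = p1, c
--     out_pairs.update(cur)
--     return any(p in in_pairs for p in out_pairs)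
-- ===== Notes on version B (the rewrite author's own statement) =====
-- stated objective: faster
-- what changed: Replaces segment lists + quadratic slicing ABA extraction + per-BAB substring scans with a single streaming pass keeping a two-char window that collects ABA pairs into an outside set and a (swapped) inside set, answering by set intersection.
import Mathlib
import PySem

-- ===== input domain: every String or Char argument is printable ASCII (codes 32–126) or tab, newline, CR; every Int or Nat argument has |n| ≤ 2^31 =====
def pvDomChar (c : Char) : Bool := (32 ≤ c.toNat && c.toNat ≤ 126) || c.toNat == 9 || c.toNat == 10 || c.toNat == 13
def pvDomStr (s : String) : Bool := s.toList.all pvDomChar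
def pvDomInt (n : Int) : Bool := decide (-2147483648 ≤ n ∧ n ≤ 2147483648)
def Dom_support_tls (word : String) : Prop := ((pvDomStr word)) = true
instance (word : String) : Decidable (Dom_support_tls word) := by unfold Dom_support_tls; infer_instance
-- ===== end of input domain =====

-- B replaces A's segment lists + slicing ABA extraction + per-BAB substring scans with one
-- streaming pass (two-char window, pair sets, set-intersection test).


-- ===== PORT A =====
-- split_word: loop over the characters with state (outside, inside, temp)
def stepA (st : List (List Char) × List (List Char) × List Char) (c : Char) :
    List (List Char) × List (List Char) × List Char :=
  let (o, i, t) := st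
  if c = '[' then (o ++ [t], i, [])
  else if c = ']' then (o, i ++ [t], [])
  else (o, i, t ++ [c])

def splitWordA (word : List Char) : List (List Char) × List (List Char) :=
  let st := word.foldl stepA ([], [], [])
  (st.1 ++ [st.2.2], st.2.1)

-- is_aba(word) on a 3-char slice word[:3] = [a, b, c]
def isAbaA (a b c : Char) : Bool := a = c ∧ a ≠ b

-- extract_abas: while len(word) > 2, test word[:3], then word = word[1:]
def extractAbas : List Char → List (List Char)
  | a :: b :: c :: rest =>
      (if isAbaA a b c then [[a, b, c]] else []) ++ extractAbas (b :: c :: rest)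
  | _ => []

-- to_bab: word[1] + word[0] + word[1]; indices in range because extract_abas
-- only ever yields 3-char strings (the assert in A always passes)
def toBabA (w : List Char) : List Char :=
  [PySem.List.pyGetD w 1 ' ', PySem.List.pyGetD w 0 ' ', PySem.List.pyGetD w 1 ' ']

def support_tls (word : String) : Bool :=
  let oi := splitWordA word.toList
  let outsideAbas : PySem.Set (List Char) :=
    PySem.Set.ofList (oi.1.flatMap extractAbas)  -- uniq(flatten(...))
  if outsideAbas = [] then false
  else
    let possibleBabs := outsideAbas.map toBabA
    -- for bab in possible_babs: for words in inside: if bab in words: return True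
    possibleBabs.any (fun bab => oi.2.any (fun seg => PySem.Chars.isIn bab seg))

-- ===== PORT B =====
-- state: (out_pairs, in_pairs, cur, p2, p1)
abbrev StB : Type :=
  PySem.Set (Char × Char) × PySem.Set (Char × Char) × PySem.Set (Char × Char) ×
    Option Char × Option Char

def stepB (st : StB) (c : Char) : StB :=
  let (outs, ins, cur, p2, p1) := st
  if c = '[' then (PySem.Set.update outs cur, ins, PySem.Set.empty, none, none)
  else if c = ']' then
    (outs, PySem.Set.update ins (cur.map (fun p => (p.2, p.1))), PySem.Set.empty, none, none)
  else
    let cur' := match p2, p1 with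
      | some a, some b => if a = c ∧ a ≠ b then PySem.Set.add cur (a, b) else cur
      | _, _ => cur
    (outs, ins, cur', p1, some c)

def support_tls_alt (word : String) : Bool :=
  let st := word.toList.foldl stepB
    (PySem.Set.empty, PySem.Set.empty, PySem.Set.empty, none, none)
  let (outs, ins, cur, _, _) := st
  let outs' := PySem.Set.update outs cur
  outs'.any (fun p => PySem.Set.contains ins p)

-- ===== PRECONDITION & SPEC =====
def Spec_support_tls (word : String) (out : Bool) : Prop := out = support_tls_alt word
instance (word : String) (out : Bool) : Decidable (Spec_support_tls word out) := by unfold Spec_support_tls; infer_instance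

-- ===== CLAIM (what is proved, stated in full; the proofs are below) =====
def Claim_equal_support_tls : Prop := ∀ (word : String), Dom_support_tls word → Spec_support_tls word (support_tls word)

-- ===== LEMMAS AND PROOFS =====

theorem not_aba_infix_nil (a b : Char) : ¬ ([a, b, a] <:+: ([] : List Char)) := by
  intro h; simpa using h.length_le

-- a two-element suffix, read off the last two elements
theorem suffix_pair_iff (t : List Char) (a b : Char) :
    [a, b] <:+ t ↔ t.getLast? = some b ∧ t.dropLast.getLast? = some a := by
  constructor
  · rintro ⟨u, rfl⟩
    rw [show u ++ [a, b] = (u ++ [a]) ++ [b] by simp]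
    rw [List.dropLast_concat]
    exact ⟨List.getLast?_concat, List.getLast?_concat⟩
  · rintro ⟨hb, ha⟩
    obtain ⟨u, rfl⟩ := List.getLast?_eq_some_iff.mp hb
    rw [List.dropLast_concat] at ha
    obtain ⟨v, rfl⟩ := List.getLast?_eq_some_iff.mp ha
    exact ⟨v, by simp⟩

theorem suffix_aba_iff (t : List Char) (c a b : Char) :
    [a, b, a] <:+ t ++ [c] ↔ c = a ∧ t.getLast? = some b ∧ t.dropLast.getLast? = some a := by
  constructor
  · rintro ⟨u, hu⟩
    have hu' : (u ++ [a, b]).concat a = t.concat c := by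
      simpa [List.concat_eq_append] using hu
    obtain ⟨h1, h2⟩ := List.concat_inj.mp hu'
    exact ⟨h2.symm, (suffix_pair_iff t a b).mp ⟨u, h1⟩⟩
  · rintro ⟨hca, hb, ha⟩
    obtain ⟨u, hu⟩ := (suffix_pair_iff t a b).mpr ⟨hb, ha⟩
    exact ⟨u, by rw [← hu, hca]; simp⟩

theorem infix_append_singleton_iff (s t : List Char) (c : Char) :
    s <:+: t ++ [c] ↔ s <:+ (t ++ [c]) ∨ s <:+: t := by
  rw [← List.reverse_infix]
  simp only [List.reverse_append, List.reverse_singleton, List.singleton_append]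
  rw [List.infix_cons_iff]
  constructor
  · rintro (h | h)
    · left
      rw [← List.reverse_prefix]
      simpa [List.reverse_append] using h
    · right; exact List.reverse_infix.mp h
  · rintro (h | h)
    · left
      have := List.reverse_prefix.mpr h
      simpa [List.reverse_append] using this
    · right; exact List.reverse_infix.mpr h

theorem aba_infix_append (t : List Char) (c a b : Char) :
    [a, b, a] <:+: t ++ [c] ↔
      [a, b, a] <:+: t ∨ (c = a ∧ t.getLast? = some b ∧ t.dropLast.getLast? = some a) := by
  rw [infix_append_singleton_iff, suffix_aba_iff]
  tauto

theorem mem_extractAbas : ∀ (l : List Char) (w : List Char),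
    w ∈ extractAbas l ↔ ∃ a b, w = [a, b, a] ∧ a ≠ b ∧ [a, b, a] <:+: l
  | [], w => by
      simp only [extractAbas, List.not_mem_nil, false_iff]
      rintro ⟨a, b, rfl, hab, h⟩
      exact not_aba_infix_nil a b h
  | [x], w => by
      simp only [extractAbas, List.not_mem_nil, false_iff]
      rintro ⟨a, b, rfl, hab, h⟩
      have := h.length_le
      simp at this
  | [x, y], w => by
      simp only [extractAbas, List.not_mem_nil, false_iff]
      rintro ⟨a, b, rfl, hab, h⟩
      have := h.length_le
      simp at this
  | a :: b :: c :: rest, w => by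
      rw [show extractAbas (a :: b :: c :: rest) =
            (if isAbaA a b c then [[a, b, c]] else []) ++ extractAbas (b :: c :: rest) from rfl]
      rw [List.mem_append, mem_extractAbas (b :: c :: rest) w]
      constructor
      · rintro (h | ⟨x, y, rfl, hxy, hinf⟩)
        · by_cases hab : isAbaA a b c = true
          · rw [if_pos hab] at h
            simp only [List.mem_singleton] at h
            subst h
            simp only [isAbaA, decide_eq_true_eq] at hab
            obtain ⟨hac, hne⟩ := hab
            have hpre : [a, b, a] <+: a :: b :: c :: rest := ⟨rest, by simp [← hac]⟩
            exact ⟨a, b, by rw [← hac], hne, hpre.isInfix⟩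
          · rw [if_neg hab] at h; simp at h
        · exact ⟨x, y, rfl, hxy, hinf.trans (List.suffix_cons a _).isInfix⟩
      · rintro ⟨x, y, rfl, hxy, hinf⟩
        rcases List.infix_cons_iff.mp hinf with hpre | hinf'
        · left
          obtain ⟨s, hs⟩ := hpre
          simp only [List.cons_append, List.nil_append, List.cons.injEq] at hs
          obtain ⟨rfl, rfl, hc, -⟩ := hs
          have hab : isAbaA x y c = true := by
            simp [isAbaA, ← hc, hxy]
          rw [if_pos hab]
          simp [← hc]
        · right; exact ⟨x, y, rfl, hxy, hinf'⟩

-- evaluation lemmas for the two step functions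
theorem stepA_lbrack (o i : List (List Char)) (t : List Char) :
    stepA (o, i, t) '[' = (o ++ [t], i, []) := rfl

theorem stepA_rbrack (o i : List (List Char)) (t : List Char) :
    stepA (o, i, t) ']' = (o, i ++ [t], []) := by simp [stepA]

theorem stepA_other (o i : List (List Char)) (t : List Char) (c : Char)
    (h1 : c ≠ '[') (h2 : c ≠ ']') : stepA (o, i, t) c = (o, i, t ++ [c]) := by
  simp [stepA, h1, h2]

theorem stepB_lbrack (outs ins cur : PySem.Set (Char × Char)) (p2 p1 : Option Char) :
    stepB (outs, ins, cur, p2, p1) '[' =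
      (PySem.Set.update outs cur, ins, PySem.Set.empty, none, none) := rfl

theorem stepB_rbrack (outs ins cur : PySem.Set (Char × Char)) (p2 p1 : Option Char) :
    stepB (outs, ins, cur, p2, p1) ']' =
      (outs, PySem.Set.update ins (cur.map (fun p => (p.2, p.1))), PySem.Set.empty,
        none, none) := by
  simp [stepB]

theorem stepB_other (outs ins cur : PySem.Set (Char × Char)) (p2 p1 : Option Char) (c : Char)
    (h1 : c ≠ '[') (h2 : c ≠ ']') :
    stepB (outs, ins, cur, p2, p1) c =
      (outs, ins,
        (match p2, p1 with
          | some a, some b => if a = c ∧ a ≠ b then PySem.Set.add cur (a, b) else cur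
          | _, _ => cur), p1, some c) := by
  simp [stepB, h1, h2]

-- the joint invariant: B's five-component state vs A's split state (outside, inside, temp)
def InvB (o i : List (List Char)) (t : List Char) (st : StB) : Prop :=
  (∀ a b : Char, (a, b) ∈ st.1 ↔ a ≠ b ∧ ∃ seg ∈ o, [a, b, a] <:+: seg) ∧
  (∀ a b : Char, (a, b) ∈ st.2.1 ↔ b ≠ a ∧ ∃ seg ∈ i, [b, a, b] <:+: seg) ∧
  (∀ a b : Char, (a, b) ∈ st.2.2.1 ↔ a ≠ b ∧ [a, b, a] <:+: t) ∧
  st.2.2.2.1 = t.dropLast.getLast? ∧ st.2.2.2.2 = t.getLast?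

theorem step_inv (o i : List (List Char)) (t : List Char) (st : StB)
    (hst : InvB o i t st) (c : Char) :
    InvB (stepA (o, i, t) c).1 (stepA (o, i, t) c).2.1 (stepA (o, i, t) c).2.2 (stepB st c) := by
  obtain ⟨outs, ins, cur, p2, p1⟩ := st
  obtain ⟨h1, h2, h3, hp2, hp1⟩ := hst
  simp only at h1 h2 h3 hp2 hp1
  by_cases hc1 : c = '['
  · subst hc1
    rw [stepA_lbrack, stepB_lbrack]
    refine ⟨?_, h2, ?_, rfl, rfl⟩
    · intro a b
      rw [show ((PySem.Set.update outs cur, ins, PySem.Set.empty, none, none) : StB).1 =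
        PySem.Set.update outs cur from rfl]
      rw [PySem.Set.mem_update _ _ _, h1 a b, h3 a b]
      constructor
      · rintro (⟨hab, seg, hseg, hinf⟩ | ⟨hab, hinf⟩)
        · exact ⟨hab, seg, List.mem_append.mpr (Or.inl hseg), hinf⟩
        · exact ⟨hab, t, List.mem_append.mpr (Or.inr (List.mem_singleton.mpr rfl)), hinf⟩
      · rintro ⟨hab, seg, hseg, hinf⟩
        rcases List.mem_append.mp hseg with h | h
        · exact Or.inl ⟨hab, seg, h, hinf⟩
        · rw [List.mem_singleton.mp h] at hinf
          exact Or.inr ⟨hab, hinf⟩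
    · intro a b
      simp only [PySem.Set.empty, List.not_mem_nil, false_iff]
      rintro ⟨hab, hinf⟩
      exact not_aba_infix_nil a b hinf
  · by_cases hc2 : c = ']'
    · subst hc2
      rw [stepA_rbrack, stepB_rbrack]
      refine ⟨h1, ?_, ?_, rfl, rfl⟩
      · intro a b
        rw [show ((outs, PySem.Set.update ins (cur.map (fun p => (p.2, p.1))),
            PySem.Set.empty, none, none) : StB).2.1 =
          PySem.Set.update ins (cur.map (fun p => (p.2, p.1))) from rfl]
        rw [PySem.Set.mem_update _ _ _, h2 a b]
        constructor
        · rintro (⟨hba, seg, hseg, hinf⟩ | hmap)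
          · exact ⟨hba, seg, List.mem_append.mpr (Or.inl hseg), hinf⟩
          · obtain ⟨⟨x, y⟩, hmem, hxy⟩ := List.mem_map.mp hmap
            obtain ⟨hya, hxb⟩ : y = a ∧ x = b := by simpa [Prod.ext_iff] using hxy
            rw [hxb, hya] at hmem
            have := (h3 b a).mp hmem
            exact ⟨this.1, t, List.mem_append.mpr (Or.inr (List.mem_singleton.mpr rfl)), this.2⟩
        · rintro ⟨hba, seg, hseg, hinf⟩
          rcases List.mem_append.mp hseg with h | h
          · exact Or.inl ⟨hba, seg, h, hinf⟩
          · rw [List.mem_singleton.mp h] at hinf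
            exact Or.inr (List.mem_map.mpr ⟨(b, a), (h3 b a).mpr ⟨hba, hinf⟩, rfl⟩)
      · intro a b
        simp only [PySem.Set.empty, List.not_mem_nil, false_iff]
        rintro ⟨hab, hinf⟩
        exact not_aba_infix_nil a b hinf
    · -- ordinary character: temp grows, the two-char window slides
      rw [stepA_other o i t c hc1 hc2, stepB_other outs ins cur p2 p1 c hc1 hc2]
      refine ⟨h1, h2, ?_, ?_, ?_⟩
      · intro a b
        show (a, b) ∈ (match p2, p1 with
          | some x, some y => if x = c ∧ x ≠ y then PySem.Set.add cur (x, y) else cur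
          | _, _ => cur) ↔ a ≠ b ∧ [a, b, a] <:+: t ++ [c]
        rw [aba_infix_append]
        cases hP2 : p2 with
        | none =>
          rw [hP2] at hp2
          cases hP1 : p1 with
          | none =>
            change (a, b) ∈ cur ↔ _
            rw [h3 a b]
            constructor
            · rintro ⟨hab, hinf⟩; exact ⟨hab, Or.inl hinf⟩
            · rintro ⟨hab, (hinf | ⟨-, -, hdl⟩)⟩
              · exact ⟨hab, hinf⟩
              · rw [← hp2] at hdl; cases hdl
          | some y =>
            change (a, b) ∈ cur ↔ _
            rw [h3 a b]
            constructor
            · rintro ⟨hab, hinf⟩; exact ⟨hab, Or.inl hinf⟩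
            · rintro ⟨hab, (hinf | ⟨-, -, hdl⟩)⟩
              · exact ⟨hab, hinf⟩
              · rw [← hp2] at hdl; cases hdl
        | some x =>
          rw [hP2] at hp2
          cases hP1 : p1 with
          | none =>
            exfalso
            rw [hP1] at hp1
            have ht : t = [] := List.getLast?_eq_none_iff.mp hp1.symm
            rw [ht] at hp2
            simp at hp2
          | some y =>
            rw [hP1] at hp1
            change (a, b) ∈ (if x = c ∧ x ≠ y then PySem.Set.add cur (x, y) else cur) ↔ _
            by_cases hcond : x = c ∧ x ≠ y
            · rw [if_pos hcond]
              rw [PySem.Set.mem_add _ _ _, h3 a b]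
              constructor
              · rintro (⟨hab, hinf⟩ | hxy)
                · exact ⟨hab, Or.inl hinf⟩
                · obtain ⟨hax, hby⟩ : a = x ∧ b = y := by simpa [Prod.ext_iff] using hxy
                  refine ⟨by rw [hax, hby]; exact hcond.2, Or.inr ?_⟩
                  refine ⟨by rw [hax]; exact hcond.1.symm, ?_, ?_⟩
                  · rw [hby]; exact hp1.symm
                  · rw [hax]; exact hp2.symm
              · rintro ⟨hab, (hinf | ⟨hca, hb, hdl⟩)⟩
                · exact Or.inl ⟨hab, hinf⟩
                · right
                  have hax : x = a := by rw [← hp2] at hdl; exact Option.some_inj.mp hdl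
                  have hby : y = b := by rw [← hp1] at hb; exact Option.some_inj.mp hb
                  rw [Prod.ext_iff]
                  exact ⟨hax.symm, hby.symm⟩
            · rw [if_neg hcond]
              rw [h3 a b]
              constructor
              · rintro ⟨hab, hinf⟩; exact ⟨hab, Or.inl hinf⟩
              · rintro ⟨hab, (hinf | ⟨hca, hb, hdl⟩)⟩
                · exact ⟨hab, hinf⟩
                · exfalso
                  have hax : x = a := by rw [← hp2] at hdl; exact Option.some_inj.mp hdl
                  have hby : y = b := by rw [← hp1] at hb; exact Option.some_inj.mp hb
                  exact hcond ⟨by rw [hax, hca], by rw [hax, hby]; exact hab⟩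
      · show p1 = (t ++ [c]).dropLast.getLast?
        rw [List.dropLast_concat]
        exact hp1
      · show some c = (t ++ [c]).getLast?
        rw [List.getLast?_concat]

theorem foldl_inv (l : List Char) : ∀ (o i : List (List Char)) (t : List Char) (st : StB),
    InvB o i t st →
    InvB (l.foldl stepA (o, i, t)).1 (l.foldl stepA (o, i, t)).2.1
      (l.foldl stepA (o, i, t)).2.2 (l.foldl stepB st) := by
  induction l with
  | nil => intro o i t st h; simpa using h
  | cons c l ih =>
    intro o i t st h
    simp only [List.foldl_cons]
    have h' := step_inv o i t st h c
    have := ih (stepA (o, i, t) c).1 (stepA (o, i, t) c).2.1 (stepA (o, i, t) c).2.2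
      (stepB st c) h'
    simpa using this

theorem toBabA_eval (a b : Char) : toBabA [a, b, a] = [b, a, b] := rfl

-- ===== VERDICT (by name: the statement is the Claim_ definition above) =====
theorem support_tls_spec : Claim_equal_support_tls := by
  intro word _
  unfold Spec_support_tls
  have hInit : InvB [] [] []
      (PySem.Set.empty, PySem.Set.empty, PySem.Set.empty, none, none) := by
    refine ⟨by intro a b; simp [PySem.Set.empty], by intro a b; simp [PySem.Set.empty],
      ?_, rfl, rfl⟩
    intro a b
    simp only [PySem.Set.empty, List.not_mem_nil, false_iff]
    rintro ⟨hab, hinf⟩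
    exact not_aba_infix_nil a b hinf
  have hInv := foldl_inv word.toList [] [] [] _ hInit
  rcases hstA : word.toList.foldl stepA ([], [], []) with ⟨o, i, t⟩
  rcases hstB : word.toList.foldl stepB
      (PySem.Set.empty, PySem.Set.empty, PySem.Set.empty, none, none) with
    ⟨outs, ins, cur, p2, p1⟩
  rw [hstA, hstB] at hInv
  obtain ⟨h1, h2, h3, -, -⟩ := hInv
  simp only at h1 h2 h3
  have hsplit : splitWordA word.toList = (o ++ [t], i) := by
    unfold splitWordA
    rw [hstA]
  have hA : support_tls word = true ↔ (∃ a b : Char, a ≠ b ∧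
      (∃ seg ∈ o ++ [t], [a, b, a] <:+: seg) ∧ (∃ seg ∈ i, [b, a, b] <:+: seg)) := by
    unfold support_tls
    rw [hsplit]
    simp only
    by_cases hS : PySem.Set.ofList ((o ++ [t]).flatMap extractAbas) = ([] : List (List Char))
    · rw [if_pos hS]
      simp only [Bool.false_eq_true, false_iff]
      rintro ⟨a, b, hab, ⟨seg, hseg, hinf⟩, -⟩
      have hmem : [a, b, a] ∈ (o ++ [t]).flatMap extractAbas :=
        List.mem_flatMap.mpr ⟨seg, hseg, (mem_extractAbas seg _).mpr ⟨a, b, rfl, hab, hinf⟩⟩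
      have := (PySem.Set.mem_ofList _ _).mpr hmem
      rw [hS] at this
      simp at this
    · rw [if_neg hS]
      rw [List.any_eq_true]
      constructor
      · rintro ⟨bab, hbab, hin⟩
        obtain ⟨w, hwS, rfl⟩ := List.mem_map.mp hbab
        obtain ⟨seg, hseg, hw⟩ := List.mem_flatMap.mp ((PySem.Set.mem_ofList _ _).mp hwS)
        obtain ⟨a, b, rfl, hab, hinf⟩ := (mem_extractAbas seg _).mp hw
        rw [toBabA_eval] at hin
        obtain ⟨seg', hseg', hisin⟩ := List.any_eq_true.mp hin
        exact ⟨a, b, hab, ⟨seg, hseg, hinf⟩,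
          ⟨seg', hseg', (PySem.Chars.isIn_iff_infix _ _).mp hisin⟩⟩
      · rintro ⟨a, b, hab, ⟨seg, hseg, hinf⟩, seg', hseg', hinf'⟩
        refine ⟨toBabA [a, b, a], List.mem_map.mpr ⟨[a, b, a], ?_, rfl⟩, ?_⟩
        · exact (PySem.Set.mem_ofList _ _).mpr
            (List.mem_flatMap.mpr ⟨seg, hseg, (mem_extractAbas seg _).mpr ⟨a, b, rfl, hab, hinf⟩⟩)
        · rw [toBabA_eval]
          exact List.any_eq_true.mpr ⟨seg', hseg', (PySem.Chars.isIn_iff_infix _ _).mpr hinf'⟩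
  have hB : support_tls_alt word = true ↔ (∃ a b : Char, a ≠ b ∧
      (∃ seg ∈ o ++ [t], [a, b, a] <:+: seg) ∧ (∃ seg ∈ i, [b, a, b] <:+: seg)) := by
    unfold support_tls_alt
    rw [hstB]
    simp only
    rw [List.any_eq_true]
    constructor
    · rintro ⟨⟨a, b⟩, hp, hcont⟩
      have hout : a ≠ b ∧ ∃ seg ∈ o ++ [t], [a, b, a] <:+: seg := by
        rcases (PySem.Set.mem_update _ _ _).mp hp with h | h
        · obtain ⟨hab, seg, hseg, hinf⟩ := (h1 a b).mp h
          exact ⟨hab, seg, List.mem_append.mpr (Or.inl hseg), hinf⟩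
        · obtain ⟨hab, hinf⟩ := (h3 a b).mp h
          exact ⟨hab, t, List.mem_append.mpr (Or.inr (List.mem_singleton.mpr rfl)), hinf⟩
      obtain ⟨-, hins⟩ := (h2 a b).mp ((PySem.Set.contains_iff _ _).mp hcont)
      exact ⟨a, b, hout.1, hout.2, hins⟩
    · rintro ⟨a, b, hab, ⟨seg, hseg, hinf⟩, hbab⟩
      refine ⟨(a, b), (PySem.Set.mem_update _ _ _).mpr ?_, (PySem.Set.contains_iff _ _).mpr
        ((h2 a b).mpr ⟨hab.symm, hbab⟩)⟩
      rcases List.mem_append.mp hseg with h | h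
      · exact Or.inl ((h1 a b).mpr ⟨hab, seg, h, hinf⟩)
      · rw [List.mem_singleton.mp h] at hinf
        exact Or.inr ((h3 a b).mpr ⟨hab, hinf⟩)
  cases hA2 : support_tls word with
  | true => exact (hB.mpr (hA.mp hA2)).symm
  | false =>
    cases hB2 : support_tls_alt word with
    | false => rfl
    | true =>
      have hcontr := hA.mpr (hB.mp hB2)
      rw [hA2] at hcontr
      simp at hcontr
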